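-- pv_equiv track=rewrite | github.com/MichalRumiancew/the_keymaker | keymaker.py | pad_up_to
-- ===== SOURCE A (Python) =====
-- import string
--
-- ALPHABET = string.ascii_lowercase
--
-- def shift_characters(word, shift):
--     new_word = ""
--     for char in word:
--         char_index = ALPHABET.index(char)
--         new_index = (char_index + shift) % len(ALPHABET)
--         new_word += ALPHABET[new_index]
--     return new_word
--
--     """
--     >>> shift_characters('abby', 5)
--     'fggd'
--     """
--
-- def pad_up_to(word, shift, n):
--     new_word = ""
--     new_word += word
--     while len(new_word) < n:
--         next_word = shift_characters(word, shift)
--         new_word += next_word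
--         word = next_word
--     return new_word[:n]
--
--     """
--     >>> pad_up_to('abb', 5, 11)
--     'abbfggkllpq'
--     """
-- ===== SOURCE B (Python) =====
-- import string
--
-- ALPHABET = string.ascii_lowercase
--
--
-- def shift_characters(word, shift):
--     new_word = ""
--     for char in word:
--         char_index = ALPHABET.index(char)
--         new_index = (char_index + shift) % len(ALPHABET)
--         new_word += ALPHABET[new_index]
--     return new_word
--
--
-- def pad_up_to(word, shift, n):
--     # No while loop: compute the number of extra blocks up front (ceiling
--     # division), build block i as the ORIGINAL word shifted by i*shift
--     # (shifts compose additively mod 26), join and truncate.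
--     if n <= len(word):
--         return word[:n]
--     blocks = -(-(n - len(word)) // len(word))
--     joined = "".join(shift_characters(word, i * shift) for i in range(1, blocks + 1))
--     return (word + joined)[:n]
-- ===== Notes on version B (the rewrite author's own statement) =====
-- stated objective: alternative
-- what changed: B removes A's while loop that threads the previously produced block: it computes the number of needed blocks in closed form by ceiling division, builds block i directly as the original word shifted by i*shift (shifts compose additively mod 26), joins them and truncates.
-- outside the precondition, e.g. on pad_up_to('a!', 1, 5): A raises ValueError, B raises ValueError; on pad_up_to('', 1, 3): A does not finish within the time limit, B raises ZeroDivisionError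
import Mathlib
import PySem

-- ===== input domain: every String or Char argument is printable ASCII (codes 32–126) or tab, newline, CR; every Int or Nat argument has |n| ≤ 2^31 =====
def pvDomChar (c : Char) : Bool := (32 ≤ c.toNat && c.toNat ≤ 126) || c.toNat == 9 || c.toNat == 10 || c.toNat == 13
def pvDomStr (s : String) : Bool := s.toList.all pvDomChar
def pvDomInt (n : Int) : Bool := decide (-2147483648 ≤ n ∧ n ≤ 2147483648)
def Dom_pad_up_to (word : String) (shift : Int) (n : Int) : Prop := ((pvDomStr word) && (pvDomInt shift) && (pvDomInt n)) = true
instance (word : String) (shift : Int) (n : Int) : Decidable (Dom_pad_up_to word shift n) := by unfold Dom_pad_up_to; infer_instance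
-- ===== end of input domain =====

-- B replaces A's while loop (which threads the previously produced block) by a
-- closed-form ceiling-division block count and a join of independently computed
-- blocks (block i = original word shifted by i*shift); same cost, different algorithm.

-- ===== PORT A =====
-- ALPHABET = string.ascii_lowercase
def pvAbet : List Char := "abcdefghijklmnopqrstuvwxyz".toList

-- shift_characters: the fold returns none exactly where Python raises ValueError
-- (ALPHABET.index fails); .toNat on the new index is exact because Python's %
-- with the positive divisor 26 yields a result in [0, 26).
def pvShiftChars (w : List Char) (s : Int) : Option (List Char) :=
  w.foldl
    (fun acc c =>
      acc.bind fun nw =>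
        match PySem.List.index? pvAbet c with
        | none => none
        | some i => some (nw ++ [pvAbet.getD (PySem.Int.mod ((i : Int) + s) 26).toNat ' ']))
    (some [])

-- the while loop of A; fuel is artificial (the Python loop has none): Pre_ excludes
-- the inputs where the loop diverges or shift_characters raises, and there the fuel
-- n.toNat + 1 is proven to never run out (each pass appends ≥ 1 character)
def pvLoopA (shift n : Int) : Nat → List Char → List Char → List Char
  | fuel, nw, w =>
    if (nw.length : Int) < n then
      match fuel with
      | 0 => nw
      | f + 1 =>
        match pvShiftChars w shift with
        | none => nw
        | some next => pvLoopA shift n f (nw ++ next) next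
    else nw

def pad_up_to (word : String) (shift : Int) (n : Int) : String :=
  String.ofList (PySem.List.slice (pvLoopA shift n (n.toNat + 1) word.toList word.toList) none (some n))

-- ===== PORT B =====
-- no loop over the result: closed-form block count (ceiling division), then a
-- join over range(1, blocks+1) of the original word shifted by i*shift.
-- The fold returns none exactly where Python raises ValueError; the "" default
-- and the floordiv-by-zero case are unreachable inside Pre_ (Python raises
-- ZeroDivisionError on the empty word there).
def pad_up_to_alt (word : String) (shift : Int) (n : Int) : String :=
  let L : Int := word.toList.length
  if n ≤ L then String.ofList (PySem.List.slice word.toList none (some n))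
  else
    let blocks : Int := -(PySem.Int.floordiv (-(n - L)) L)
    match (PySem.List.pyRange 1 (blocks + 1) 1).foldl
        (fun acc i => acc.bind fun r => (pvShiftChars word.toList (i * shift)).map (fun b => r ++ b))
        (some []) with
    | some joined => String.ofList (PySem.List.slice (word.toList ++ joined) none (some n))
    | none => ""

-- ===== PRECONDITION & SPEC =====
-- Pre_ excludes exactly the inputs where A does not return: when padding is needed
-- (len(word) < n), Python raises ValueError if word has a char outside a-z, and
-- loops forever if word is empty.
def Pre_pad_up_to (word : String) (shift : Int) (n : Int) : Prop :=
  n ≤ (word.toList.length : Int) ∨ (word.toList ≠ [] ∧ ∀ c ∈ word.toList, c ∈ pvAbet)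
instance (word : String) (shift : Int) (n : Int) : Decidable (Pre_pad_up_to word shift n) := by
  unfold Pre_pad_up_to; infer_instance

def pvWitness_pad_up_to : String × Int × Int := ("abb", 5, 2)

def Spec_pad_up_to (word : String) (shift : Int) (n : Int) (out : String) : Prop := out = pad_up_to_alt word shift n
instance (word : String) (shift : Int) (n : Int) (out : String) : Decidable (Spec_pad_up_to word shift n out) := by unfold Spec_pad_up_to; infer_instance

-- ===== CLAIM =====
def Claim_equal_pad_up_to : Prop := ∀ (word : String) (shift : Int) (n : Int), Dom_pad_up_to word shift n → Pre_pad_up_to word shift n → Spec_pad_up_to word shift n (pad_up_to word shift n)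

-- ===== LEMMAS AND PROOFS =====

-- the shifted character, as a total function (proofs only)
def pvShc (s : Int) (c : Char) : Char :=
  match PySem.List.index? pvAbet c with
  | some i => pvAbet.getD (PySem.Int.mod ((i : Int) + s) 26).toNat ' '
  | none => ' '

-- block j, j+1, …, j+m-1 concatenated (proofs only)
def pvGen (word : List Char) (shift : Int) (k : Int) : List Char := word.map (pvShc (k * shift))
def pvBigJoin (word : List Char) (shift : Int) : Nat → Int → List Char
  | 0, _ => []
  | m + 1, j => pvGen word shift j ++ pvBigJoin word shift m (j + 1)

theorem pv_mod26 (a : Int) : PySem.Int.mod a 26 = a % 26 :=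
  PySem.Int.mod_eq_emod_of_pos (by omega)

theorem pv_key : ∀ m ∈ List.range 26, PySem.List.index? pvAbet (pvAbet.getD m ' ') = some m ∧ pvAbet.getD m ' ' ∈ pvAbet := by
  decide

theorem pv_idx_lt {c : Char} {i : Nat} (h : PySem.List.index? pvAbet c = some i) : i < 26 := by
  rw [PySem.List.index?_eq_some_iff] at h
  obtain ⟨pre, suf, habet, hlen, -⟩ := h
  have : pvAbet.length = 26 := by decide
  rw [habet] at this
  simp at this
  omega

theorem pv_getD_index {c : Char} {i : Nat} (h : PySem.List.index? pvAbet c = some i) :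
    pvAbet.getD i ' ' = c := by
  rw [PySem.List.index?_eq_some_iff] at h
  obtain ⟨pre, suf, habet, hlen, -⟩ := h
  subst hlen
  rw [habet, List.getD_eq_getElem?_getD, List.getElem?_append_right le_rfl]
  simp

theorem pv_mem_idx {c : Char} (h : c ∈ pvAbet) : ∃ i, PySem.List.index? pvAbet c = some i := by
  have := PySem.List.index?_isSome_iff (xs := pvAbet) (v := c)
  rcases hh : PySem.List.index? pvAbet c with _ | i
  · rw [hh] at this; simp at this; exact absurd h this
  · exact ⟨i, rfl⟩

theorem pv_shc_spec {c : Char} {i : Nat} (h : PySem.List.index? pvAbet c = some i) (s : Int) :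
    pvShc s c = pvAbet.getD (((i : Int) + s) % 26).toNat ' ' := by
  unfold pvShc
  rw [h]
  simp

theorem pv_shc_zero {c : Char} (h : c ∈ pvAbet) : pvShc 0 c = c := by
  obtain ⟨i, hi⟩ := pv_mem_idx h
  have hlt := pv_idx_lt hi
  rw [pv_shc_spec hi]
  have : (((i : Int) + 0) % 26).toNat = i := by omega
  rw [this, pv_getD_index hi]

theorem pv_shc_comp {c : Char} (h : c ∈ pvAbet) (s s' : Int) :
    pvShc s' (pvShc s c) = pvShc (s + s') c := by
  obtain ⟨i, hi⟩ := pv_mem_idx h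
  have hlt := pv_idx_lt hi
  have hm : (((i : Int) + s) % 26).toNat ∈ List.range 26 := by
    simp; omega
  obtain ⟨hk, hmem⟩ := pv_key _ hm
  rw [pv_shc_spec hi, pv_shc_spec hk, pv_shc_spec hi]
  congr 1
  omega

theorem pv_shc_mem {c : Char} (h : c ∈ pvAbet) (s : Int) : pvShc s c ∈ pvAbet := by
  obtain ⟨i, hi⟩ := pv_mem_idx h
  have hlt := pv_idx_lt hi
  rw [pv_shc_spec hi]
  exact (pv_key _ (by simp; omega)).2

-- shift_characters on a valid word is a map
theorem pv_shiftChars_eq {w : List Char} (h : ∀ c ∈ w, c ∈ pvAbet) (s : Int) :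
    pvShiftChars w s = some (w.map (pvShc s)) := by
  suffices H : ∀ acc, w.foldl
      (fun acc c =>
        acc.bind fun nw =>
          match PySem.List.index? pvAbet c with
          | none => none
          | some i => some (nw ++ [pvAbet.getD (PySem.Int.mod ((i : Int) + s) 26).toNat ' ']))
      (some acc) = some (acc ++ w.map (pvShc s)) by
    simpa [pvShiftChars] using H []
  induction w with
  | nil => intro acc; simp
  | cons c w ih =>
    intro acc
    obtain ⟨i, hi⟩ := pv_mem_idx (h c (by simp))
    simp only [List.foldl_cons, Option.bind_some, hi]
    rw [ih (fun c hc => h c (by simp [hc])) _]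
    rw [List.map_cons, pv_shc_spec hi, pv_mod26]
    simp [List.append_assoc]

theorem pv_gen_comp {word : List Char} (h : ∀ c ∈ word, c ∈ pvAbet) (shift k : Int) :
    (pvGen word shift k).map (pvShc shift) = pvGen word shift (k + 1) := by
  unfold pvGen
  rw [List.map_map]
  apply List.map_congr_left
  intro c hc
  simp only [Function.comp_apply]
  rw [pv_shc_comp (h c hc)]
  ring_nf

theorem pv_gen_mem {word : List Char} (h : ∀ c ∈ word, c ∈ pvAbet) (shift k : Int) :
    ∀ c ∈ pvGen word shift k, c ∈ pvAbet := by
  intro c hc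
  obtain ⟨d, hd, rfl⟩ := List.mem_map.mp hc
  exact pv_shc_mem (h d hd) _

theorem pv_bigJoin_length (word : List Char) (shift : Int) (m : Nat) (j : Int) :
    (pvBigJoin word shift m j).length = m * word.length := by
  induction m generalizing j with
  | zero => simp [pvBigJoin]
  | succ m ih => simp [pvBigJoin, pvGen, ih]; ring

-- a shorter bigJoin is a prefix of a longer one
theorem pv_bigJoin_prefix (word : List Char) (shift : Int) {m m' : Nat} (h : m ≤ m') (j : Int) :
    ∃ rest, pvBigJoin word shift m' j = pvBigJoin word shift m j ++ rest := by
  induction m generalizing j m' with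
  | zero => exact ⟨pvBigJoin word shift m' j, by simp [pvBigJoin]⟩
  | succ m ih =>
    obtain ⟨m'', rfl⟩ : ∃ m'', m' = m'' + 1 := ⟨m' - 1, by omega⟩
    obtain ⟨rest, hrest⟩ := ih (m' := m'') (by omega) (j + 1)
    exact ⟨rest, by simp [pvBigJoin, hrest]⟩

-- takes agree as soon as the shorter concatenation already covers n characters
theorem pv_take_bigJoin_eq (word : List Char) (shift : Int) {m m' : Nat} (h : m ≤ m') (j : Int)
    {t : Nat} (hlen : t ≤ (word ++ pvBigJoin word shift m j).length) :
    (word ++ pvBigJoin word shift m j).take t = (word ++ pvBigJoin word shift m' j).take t := by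
  obtain ⟨rest, hrest⟩ := pv_bigJoin_prefix word shift h j
  rw [hrest, ← List.append_assoc, List.take_append_of_le_length hlen]

-- A's loop, with sufficient fuel, produces a prefix-equal concatenation of blocks
theorem pv_loopA_take {word : List Char} (h : ∀ c ∈ word, c ∈ pvAbet) (shift n : Int) :
    ∀ (fuel : Nat) (acc : List Char) (k : Int),
      n ≤ (acc.length : Int) + (fuel : Int) * word.length →
      (pvLoopA shift n fuel acc (pvGen word shift k)).take n.toNat
        = (acc ++ pvBigJoin word shift fuel (k + 1)).take n.toNat := by
  intro fuel
  induction fuel with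
  | zero =>
    intro acc k hfl
    have hge : n.toNat ≤ acc.length := by omega
    rw [pvLoopA]
    split
    · simp [pvBigJoin]
    · simp [pvBigJoin]
  | succ f ih =>
    intro acc k hfl
    by_cases hc : (acc.length : Int) < n
    · rw [pvLoopA, if_pos hc]
      have hsh : pvShiftChars (pvGen word shift k) shift = some (pvGen word shift (k + 1)) := by
        rw [pv_shiftChars_eq (pv_gen_mem h shift k) shift, pv_gen_comp h]
      rw [hsh]
      have := ih (acc ++ pvGen word shift (k + 1)) (k + 1)
        (by simp [pvGen]; push_cast at hfl; nlinarith)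
      rw [this]
      simp [pvBigJoin, List.append_assoc]
    · rw [pvLoopA, if_neg hc]
      have hge : n.toNat ≤ acc.length := by omega
      rw [List.take_append_of_le_length hge]

-- B's fold over range(1, blocks+1) is the bigJoin of blocks 1..blocks
theorem pv_foldB_eq {word : List Char} (h : ∀ c ∈ word, c ∈ pvAbet) (shift : Int) :
    ∀ (m : Nat) (j : Int) (acc : List Char),
      (PySem.List.pyRange j (j + m) 1).foldl
        (fun acc i => acc.bind fun r => (pvShiftChars word (i * shift)).map (fun b => r ++ b))
        (some acc) = some (acc ++ pvBigJoin word shift m j) := by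
  intro m
  induction m with
  | zero =>
    intro j acc
    rw [PySem.List.pyRange_one_eq_nil (by omega)]
    simp [pvBigJoin]
  | succ m ih =>
    intro j acc
    rw [PySem.List.pyRange_one_cons (by omega)]
    simp only [List.foldl_cons, Option.bind_some]
    rw [pv_shiftChars_eq h (j * shift)]
    rw [Option.map_some]
    have : j + ((m + 1 : Nat) : Int) = (j + 1) + (m : Int) := by push_cast; ring
    rw [this, ih (j + 1)]
    simp [pvBigJoin, pvGen, List.append_assoc]

-- ===== VERDICT =====
theorem pad_up_to_spec : Claim_equal_pad_up_to := by
  intro word shift n _ hpre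
  unfold Spec_pad_up_to pad_up_to pad_up_to_alt
  rcases hpre with hle | ⟨hne, hval⟩
  · rw [if_pos hle]
    have hA : pvLoopA shift n (n.toNat + 1) word.toList word.toList = word.toList := by
      rw [pvLoopA, if_neg (not_lt.mpr hle)]
    rw [hA]
  · by_cases hle : n ≤ (word.toList.length : Int)
    · rw [if_pos hle]
      have hA : pvLoopA shift n (n.toNat + 1) word.toList word.toList = word.toList := by
        rw [pvLoopA, if_neg (not_lt.mpr hle)]
      rw [hA]
    · rw [if_neg hle]
      dsimp only
      rw [not_le] at hle
      set L : Int := (word.toList.length : Int) with hL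
      have hL1 : 1 ≤ L := by
        have : word.toList.length ≠ 0 := fun hz => hne (List.eq_nil_of_length_eq_zero hz)
        omega
      set blocks : Int := -(PySem.Int.floordiv (-(n - L)) L) with hB
      have hbr : (blocks - 1) * L < n - L ∧ n - L ≤ blocks * L :=
        (PySem.Int.neg_floordiv_neg_eq_iff_of_pos (by omega)).mp hB.symm
      have hbpos : 1 ≤ blocks := by nlinarith [hbr.1, hbr.2]
      -- B's fold evaluates to the join of blocks 1..blocks
      have hfold := pv_foldB_eq hval shift blocks.toNat 1 []
      have hcast : (1 : Int) + (blocks.toNat : Int) = blocks + 1 := by omega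
      rw [hcast, List.nil_append] at hfold
      rw [hfold]
      dsimp only
      -- A's loop, sliced, is the same join sliced
      have h0 : pvGen word.toList shift 0 = word.toList := by
        unfold pvGen
        have hz : ∀ c ∈ word.toList, pvShc (0 * shift) c = c := by
          intro c hc
          rw [zero_mul]
          exact pv_shc_zero (hval c hc)
        rw [List.map_congr_left hz, List.map_id' _]
      have hnn : (n.toNat : Int) = n := by omega
      have hA := pv_loopA_take hval shift n (n.toNat + 1) word.toList 0
        (by push_cast; rw [hnn]; nlinarith)
      rw [h0] at hA
      have hn0 : (0 : Int) ≤ n := by omega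
      rw [PySem.List.slice_to _ hn0, PySem.List.slice_to _ hn0]
      congr 1
      rw [hA, zero_add]
      have hb1 : blocks - 1 ≤ (blocks - 1) * L := by nlinarith
      have hbn : blocks ≤ n := by omega
      have hlen := pv_bigJoin_length word.toList shift blocks.toNat 1
      have hbc : (blocks.toNat : Int) = blocks := by omega
      have hlenc : ((word.toList ++ pvBigJoin word.toList shift blocks.toNat 1).length : Int)
          = L + blocks * L := by
        rw [List.length_append, hlen]
        push_cast
        rw [hbc, hL]
      exact (pv_take_bigJoin_eq word.toList shift (by omega) 1 (by omega)).symm
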